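-- pv_equiv track=rewrite | github.com/ujik500/imputer-science-and-engineering | imputerSE.py | segment_to_haplotypes
-- ===== SOURCE A (Python) =====
-- def segment_to_haplotypes(seg, gt_start):
--     num_samples = len(seg[0]) - gt_start
--     num_haps = num_samples * 2
--
--     hap_lists = [[] for hap in range(num_haps)]
--
--     for snp in seg:
--         genotypes = snp[gt_start:]
--
--         for i, gt in enumerate(genotypes):
--             h1 = 2 * i
--             h2 = 2 * i + 1
--
--             if gt == "???":
--                 a, b = "?", "?"
--             else:
--                 try:
--                     a, b = gt.split("|")
--                 except:
--                     a, b = "?", "?"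
--
--             hap_lists[h1].append(a)
--             hap_lists[h2].append(b)
--
--     return ["".join(h) for h in hap_lists]
-- ===== SOURCE B (Python) =====
-- def segment_to_haplotypes(seg, gt_start):
--     def alleles(gt):
--         parts = gt.split("|")
--         return parts if len(parts) == 2 else ["?", "?"]
--
--     rows = [[a for gt in snp[gt_start:] for a in alleles(gt)] for snp in seg]
--     return ["".join(col) for col in zip(*rows)]
-- ===== Notes on version B (the rewrite author's own statement) =====
-- stated objective: simpler
-- what changed: A pre-allocates one accumulator list per haplotype index and appends into hap_lists[2*i]/[2*i+1] inside a nested indexed loop; B parses each SNP row once into a flat allele list and zip-transposes the resulting matrix, joining each column. Pre_ excludes the empty segment and rows whose genotype slice is longer than row 0's (A raises IndexError there), and ragged segments with strictly shorter rows, a malformed genotype matrix on which A's uneven strings and B's zip truncation are both unspecified defensible values.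
-- intended difference: On gt_start < 0, Python's negative-slice wraparound makes A size hap_lists as 2*(len(seg[0])+|gt_start|) but fill only the trailing alleles, so A pads its result with phantom empty haplotype strings; B returns exactly the haplotypes of the alleles present, which is the intended value. — e.g. on segment_to_haplotypes([["0|1"]], -1): A returns ["0", "1", "", ""], B returns ["0", "1"]
-- outside the precondition, e.g. on segment_to_haplotypes([['0|1'], []], 0): A returns ['0', '1'], B returns []
import Mathlib
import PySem

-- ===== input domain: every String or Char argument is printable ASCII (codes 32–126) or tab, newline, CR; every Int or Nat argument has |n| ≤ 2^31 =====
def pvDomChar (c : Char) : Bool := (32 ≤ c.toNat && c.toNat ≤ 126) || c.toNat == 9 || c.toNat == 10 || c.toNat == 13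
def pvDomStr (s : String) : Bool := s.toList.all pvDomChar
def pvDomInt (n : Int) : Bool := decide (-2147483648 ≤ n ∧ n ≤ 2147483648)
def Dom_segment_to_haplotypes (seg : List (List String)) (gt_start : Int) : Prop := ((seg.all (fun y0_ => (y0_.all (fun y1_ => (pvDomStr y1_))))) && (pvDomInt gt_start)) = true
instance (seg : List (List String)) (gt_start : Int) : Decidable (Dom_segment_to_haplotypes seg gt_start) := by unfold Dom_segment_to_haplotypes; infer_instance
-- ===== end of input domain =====

-- B replaces A's pre-allocated per-haplotype accumulator lists (appended to in place inside a
-- nested indexed loop) by parsing each SNP row into a flat allele list and zip-transposing;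
-- objective: simpler. On negative gt_start (inside D_) B returns the intended value, not A's
-- phantom empty haplotypes.

-- ===== PORT A =====
-- A-side helpers: the body of A's inner `for i, gt in enumerate(genotypes)` loop.
-- `gt.split("|")` with try/except unpack: exactly two parts, else ("?", "?").
def pvAPair (gt : String) : String × String :=
  if gt = "???" then ("?", "?")
  else
    let parts := (PySem.Str.split? gt "|").getD []   -- sep "|" ≠ "": split? is always `some`
    if parts.length = 2 then (parts.getD 0 "", parts.getD 1 "") else ("?", "?")

def pvAStep (hl : List (List String)) (p : Int × String) : List (List String) :=
  let h1 : Int := 2 * p.1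
  let h2 : Int := 2 * p.1 + 1
  let ab := pvAPair p.2
  let hl1 := PySem.List.pySetD hl h1 (PySem.List.pyGetD hl h1 [] ++ [ab.1])
  PySem.List.pySetD hl1 h2 (PySem.List.pyGetD hl1 h2 [] ++ [ab.2])

def segment_to_haplotypes (seg : List (List String)) (gt_start : Int) : List String :=
  let num_samples : Int := ((seg.headD []).length : Int) - gt_start
  let num_haps : Int := num_samples * 2
  let hap_lists : List (List String) := (PySem.List.pyRange 0 num_haps 1).map (fun _ => [])
  let hl := seg.foldl
    (fun hl snp =>
      let genotypes := PySem.List.slice snp (some gt_start) none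
      (PySem.List.enumerate genotypes 0).foldl pvAStep hl)
    hap_lists
  hl.map (fun h => PySem.Str.join "" h)

-- ===== PORT B =====
-- B-side helper: Source B's `alleles(gt)` — the two alleles of one genotype entry.
def pvAlleles (gt : String) : List String :=
  let parts := (PySem.Str.split? gt "|").getD []
  if parts.length = 2 then parts else ["?", "?"]

-- `zip(*rows)` over a list of lists: columns up to the shortest row, each joined.
def segment_to_haplotypes_alt (seg : List (List String)) (gt_start : Int) : List String :=
  let rows := seg.map (fun snp => (PySem.List.slice snp (some gt_start) none).flatMap pvAlleles)
  let m : Nat := ((rows.map List.length).min?).getD 0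
  (List.range m).map (fun j => PySem.Str.join "" (rows.map (fun r => r.getD j "")))

-- ===== PRECONDITION & SPEC =====
-- Pre_ excludes (a) the empty segment and ragged segments where some row's genotype slice is
-- LONGER than row 0's — there A raises an IndexError (seg[0], resp. hap_lists[2*i]) — and
-- (b) ragged segments with strictly SHORTER rows, where A returns haplotype strings of uneven
-- length and B truncates to the shortest row: a malformed genotype matrix on which either
-- value is defensible and neither is specified.
def Pre_segment_to_haplotypes (seg : List (List String)) (gt_start : Int) : Prop :=
  seg ≠ [] ∧ ∀ r ∈ seg,
    (PySem.List.slice r (some gt_start) none).length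
      = (PySem.List.slice (seg.headD []) (some gt_start) none).length
instance (seg : List (List String)) (gt_start : Int) : Decidable (Pre_segment_to_haplotypes seg gt_start) := by unfold Pre_segment_to_haplotypes; infer_instance

def pvWitness_segment_to_haplotypes : List (List String) × Int := ([["x", "0|1"], ["y", "???"]], 1)

-- On gt_start < 0, Python's negative-slice wraparound makes A allocate 2*(len(seg[0])+|gt_start|)
-- haplotype slots but fill only the trailing alleles, so A pads its answer with phantom empty
-- haplotype strings; B returns just the haplotypes of the alleles actually present, the intended value.
def D_segment_to_haplotypes (seg : List (List String)) (gt_start : Int) : Prop := gt_start < 0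
instance (seg : List (List String)) (gt_start : Int) : Decidable (D_segment_to_haplotypes seg gt_start) := by unfold D_segment_to_haplotypes; infer_instance

def Spec_segment_to_haplotypes (seg : List (List String)) (gt_start : Int) (out : List String) : Prop := ¬ D_segment_to_haplotypes seg gt_start → out = segment_to_haplotypes_alt seg gt_start
instance (seg : List (List String)) (gt_start : Int) (out : List String) : Decidable (Spec_segment_to_haplotypes seg gt_start out) := by unfold Spec_segment_to_haplotypes; infer_instance

def pvDiffWitness_segment_to_haplotypes : List (List String) × Int := ([["0|1"]], -1)
def pvDiffWitnessOut_segment_to_haplotypes : (List String) × (List String) := (["0", "1", "", ""], ["0", "1"])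

-- ===== CLAIM (what is proved, stated in full; the proofs are below) =====
def Claim_unchanged_segment_to_haplotypes : Prop := ∀ (seg : List (List String)) (gt_start : Int), Dom_segment_to_haplotypes seg gt_start → Pre_segment_to_haplotypes seg gt_start → Spec_segment_to_haplotypes seg gt_start (segment_to_haplotypes seg gt_start)
def Claim_changed_segment_to_haplotypes : Prop := Dom_segment_to_haplotypes (pvDiffWitness_segment_to_haplotypes.1) (pvDiffWitness_segment_to_haplotypes.2) ∧ Pre_segment_to_haplotypes (pvDiffWitness_segment_to_haplotypes.1) (pvDiffWitness_segment_to_haplotypes.2) ∧ D_segment_to_haplotypes (pvDiffWitness_segment_to_haplotypes.1) (pvDiffWitness_segment_to_haplotypes.2) ∧ segment_to_haplotypes (pvDiffWitness_segment_to_haplotypes.1) (pvDiffWitness_segment_to_haplotypes.2) = pvDiffWitnessOut_segment_to_haplotypes.1 ∧ segment_to_haplotypes_alt (pvDiffWitness_segment_to_haplotypes.1) (pvDiffWitness_segment_to_haplotypes.2) = pvDiffWitnessOut_segment_to_haplotypes.2 ∧ pvDiffWitnessOut_segment_to_haplotypes.1 ≠ pvDiffWitnessOut_segment_to_haplotypes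.2
def Claim_exact_segment_to_haplotypes : Prop := ∀ (seg : List (List String)) (gt_start : Int), Dom_segment_to_haplotypes seg gt_start → Pre_segment_to_haplotypes seg gt_start → D_segment_to_haplotypes seg gt_start → segment_to_haplotypes seg gt_start ≠ segment_to_haplotypes_alt seg gt_start

-- ===== LEMMAS AND PROOFS =====

lemma pvAlleles_eq (gt : String) : pvAlleles gt = [(pvAPair gt).1, (pvAPair gt).2] := by
  unfold pvAlleles pvAPair
  by_cases hq : gt = "???"
  · subst hq; decide
  · simp only [if_neg hq]
    generalize (PySem.Str.split? gt "|").getD [] = parts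
    by_cases h2 : parts.length = 2
    · obtain ⟨a, b, rfl⟩ := List.length_eq_two.mp h2
      simp
    · simp [h2]

lemma length_flatMap_pvAlleles (l : List String) :
    (l.flatMap pvAlleles).length = 2 * l.length := by
  induction l with
  | nil => rfl
  | cons x t ih => rw [List.flatMap_cons, List.length_append, ih, pvAlleles_eq]; simp; omega

lemma length_pvAStep (hl : List (List String)) (p : Int × String) :
    (pvAStep hl p).length = hl.length := by
  unfold pvAStep
  simp [PySem.List.length_pySetD]

lemma length_foldl_pvAStep (l : List (Int × String)) (hl : List (List String)) :
    (l.foldl pvAStep hl).length = hl.length := by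
  induction l generalizing hl with
  | nil => rfl
  | cons p t ih => simp [List.foldl_cons, ih, length_pvAStep]

lemma pvAStep_getD (hl : List (List String)) (i : Nat) (gt : String)
    (h2 : 2 * i + 1 < hl.length) (k : Nat) :
    (pvAStep hl ((i : Int), gt)).getD k []
      = if k = 2 * i then hl.getD k [] ++ [(pvAPair gt).1]
        else if k = 2 * i + 1 then hl.getD k [] ++ [(pvAPair gt).2]
        else hl.getD k [] := by
  unfold pvAStep
  have c1 : (2 : Int) * ((i : Nat) : Int) = ((2 * i : Nat) : Int) := by push_cast; ring
  have c2 : ((2 * i : Nat) : Int) + 1 = ((2 * i + 1 : Nat) : Int) := by push_cast; ring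
  simp only [c1, c2, PySem.List.pySetD_natCast, PySem.List.pyGetD_natCast]
  have hne : 2 * i ≠ 2 * i + 1 := by omega
  by_cases hk2 : k = 2 * i + 1
  · subst hk2
    rw [List.getD_eq_getElem?_getD, List.getElem?_set_self (by simpa using h2)]
    rw [if_neg (by omega), if_pos rfl]
    rw [List.getD_eq_getElem?_getD, List.getElem?_set_ne hne, ← List.getD_eq_getElem?_getD]
    simp
  · rw [List.getD_eq_getElem?_getD, List.getElem?_set_ne (fun h => hk2 h.symm)]
    by_cases hk1 : k = 2 * i
    · subst hk1
      rw [List.getElem?_set_self (by omega), if_pos rfl]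
      simp
    · rw [List.getElem?_set_ne (fun h => hk1 h.symm), if_neg hk1, if_neg hk2,
        ← List.getD_eq_getElem?_getD]

lemma foldl_pvAStep_enumerate (g : List String) : ∀ (i : Nat) (hl : List (List String)),
    2 * i + 2 * g.length ≤ hl.length → ∀ k : Nat, k < hl.length →
    ((PySem.List.enumerate g (i : Int)).foldl pvAStep hl).getD k []
      = hl.getD k [] ++
        (if 2 * i ≤ k then ((g.flatMap pvAlleles)[k - 2 * i]?).toList else []) := by
  induction g with
  | nil =>
    intro i hl _ k _
    simp [PySem.List.enumerate]
  | cons gt rest ih =>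
    intro i hl hb k hk
    rw [PySem.List.enumerate_cons, List.foldl_cons]
    have hcast : ((i : Nat) : Int) + 1 = (((i + 1 : Nat)) : Int) := by push_cast; ring
    rw [hcast]
    have hlen1 : (pvAStep hl ((i : Int), gt)).length = hl.length := length_pvAStep _ _
    have hb' : 2 * (i + 1) + 2 * rest.length ≤ (pvAStep hl ((i : Int), gt)).length := by
      rw [hlen1]; simp at hb ⊢; omega
    rw [ih (i + 1) _ hb' k (by omega)]
    rw [pvAStep_getD hl i gt (by simp at hb; omega) k]
    have hflat : (gt :: rest).flatMap pvAlleles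
        = (pvAPair gt).1 :: (pvAPair gt).2 :: rest.flatMap pvAlleles := by
      rw [List.flatMap_cons, pvAlleles_eq]; rfl
    rw [hflat]
    by_cases hk1 : k = 2 * i
    · subst hk1
      rw [if_pos rfl, if_neg (by omega), if_pos (by omega)]
      simp
    · by_cases hk2 : k = 2 * i + 1
      · subst hk2
        rw [if_neg hk1, if_pos rfl, if_neg (by omega), if_pos (by omega)]
        have : 2 * i + 1 - 2 * i = 1 := by omega
        simp [this]
      · rw [if_neg hk1, if_neg hk2]
        by_cases hge : 2 * i ≤ k
        · have hge2 : 2 * (i + 1) ≤ k := by omega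
          rw [if_pos hge2, if_pos hge]
          have e1 : k - 2 * i = (k - 2 * (i + 1)) + 2 := by omega
          rw [e1]
          simp [List.getElem?_cons_succ]
        · rw [if_neg (by omega), if_neg hge]

lemma length_foldl_rows (gt_start : Int) (seg' : List (List String)) :
    ∀ hl : List (List String),
    (seg'.foldl (fun hl snp =>
        (PySem.List.enumerate (PySem.List.slice snp (some gt_start) none) 0).foldl pvAStep hl)
      hl).length = hl.length := by
  induction seg' with
  | nil => intro hl; rfl
  | cons s rest ih =>
    intro hl
    rw [List.foldl_cons, ih, length_foldl_pvAStep]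

lemma foldl_rows (gt_start : Int) (seg' : List (List String)) :
    ∀ hl : List (List String),
    (∀ r ∈ seg', 2 * (PySem.List.slice r (some gt_start) none).length ≤ hl.length) →
    ∀ k : Nat, k < hl.length →
    (seg'.foldl (fun hl snp =>
        (PySem.List.enumerate (PySem.List.slice snp (some gt_start) none) 0).foldl pvAStep hl)
      hl).getD k []
      = hl.getD k [] ++
        seg'.filterMap (fun snp =>
          ((PySem.List.slice snp (some gt_start) none).flatMap pvAlleles)[k]?) := by
  induction seg' with
  | nil => intro hl _ k _; simp
  | cons s rest ih =>
    intro hl hb k hk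
    rw [List.foldl_cons]
    have hb0 : 2 * 0 + 2 * (PySem.List.slice s (some gt_start) none).length ≤ hl.length := by
      simpa using hb s (by simp)
    have hinner := foldl_pvAStep_enumerate (PySem.List.slice s (some gt_start) none) 0 hl hb0
    have hlen1 : ((PySem.List.enumerate (PySem.List.slice s (some gt_start) none)
        ((0 : Nat) : Int)).foldl pvAStep hl).length = hl.length := length_foldl_pvAStep _ _
    have hcast0 : ((0 : Nat) : Int) = (0 : Int) := by norm_num
    rw [ih _ (by intro r hr; rw [← hcast0, hlen1]; exact hb r (by simp [hr]))
        k (by rw [← hcast0, hlen1]; exact hk)]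
    rw [← hcast0, hinner k hk]
    simp only [Nat.mul_zero, Nat.zero_le, if_pos, Nat.sub_zero, List.filterMap_cons]
    cases hc : ((PySem.List.slice s (some gt_start) none).flatMap pvAlleles)[k]? with
    | none => simp
    | some v => simp

lemma min?_replicate_succ (n : Nat) (c : Nat) :
    (List.replicate (n + 1) c).min? = some c := by
  induction n with
  | zero => rfl
  | succ k ih =>
    rw [List.replicate_succ, List.min?_cons, ih]
    simp

lemma filterMap_getElem?_eq_map (f : List String → List String)
    (L : List (List String)) (n : Nat) (h : ∀ r ∈ L, n < (f r).length) :
    L.filterMap (fun s => (f s)[n]?) = L.map (fun s => (f s).getD n "") := by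
  induction L with
  | nil => rfl
  | cons s t ih =>
    have hs : (f s)[n]? = some ((f s).getD n "") := by
      rw [List.getD_eq_getElem?_getD, List.getElem?_eq_getElem (h s (by simp))]; rfl
    rw [List.filterMap_cons, hs, List.map_cons, ih (fun r hr => h r (by simp [hr]))]

-- A's result length equals num_haps (independent of the loop contents).
lemma lengthA (seg : List (List String)) (gt_start : Int) :
    (segment_to_haplotypes seg gt_start).length
      = ((((seg.headD []).length : Int) - gt_start) * 2).toNat := by
  unfold segment_to_haplotypes
  rw [List.length_map, length_foldl_rows, List.length_map,
    PySem.List.length_pyRange_one]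
  norm_num

-- B's rows all have the same length under Pre_, so min = row 0's parsed length.
lemma lengthB (seg : List (List String)) (gt_start : Int)
    (hne : seg ≠ [])
    (hpre : ∀ r ∈ seg, (PySem.List.slice r (some gt_start) none).length
      = (PySem.List.slice (seg.headD []) (some gt_start) none).length) :
    (segment_to_haplotypes_alt seg gt_start).length
      = 2 * (PySem.List.slice (seg.headD []) (some gt_start) none).length := by
  unfold segment_to_haplotypes_alt
  have hall : (seg.map (fun snp =>
      (PySem.List.slice snp (some gt_start) none).flatMap pvAlleles)).map List.length
      = List.replicate seg.length
          (2 * (PySem.List.slice (seg.headD []) (some gt_start) none).length) := by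
    rw [List.map_map, List.eq_replicate_iff]
    constructor
    · simp
    · intro b hb
      obtain ⟨r, hr, rfl⟩ := List.mem_map.mp hb
      simp only [Function.comp]
      rw [length_flatMap_pvAlleles, hpre r hr]
  rw [List.length_map, List.length_range, hall]
  cases seg with
  | nil => exact absurd rfl hne
  | cons a t =>
    rw [List.length_cons, min?_replicate_succ]
    rfl

-- ===== VERDICT (by name: the statement is the Claim_ definition above) =====
theorem segment_to_haplotypes_spec : Claim_unchanged_segment_to_haplotypes := by
  intro seg gt_start _ hpre hD
  unfold Pre_segment_to_haplotypes at hpre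
  obtain ⟨hne, hpre⟩ := hpre
  unfold D_segment_to_haplotypes at hD
  have hD' : 0 ≤ gt_start := by omega
  -- gt_start ≥ 0: write it as a Nat cast
  obtain ⟨gN, rfl⟩ : ∃ gN : Nat, gt_start = (gN : Int) := ⟨gt_start.toNat, (Int.toNat_of_nonneg hD').symm⟩
  have hslice : ∀ r : List String,
      PySem.List.slice r (some (gN : Int)) none = r.drop gN :=
    fun r => PySem.List.slice_from_natCast r gN
  set w := (PySem.List.slice (seg.headD []) (some (gN : Int)) none).length with hw
  have hwval : w = (seg.headD []).length - gN := by
    rw [hw, hslice, List.length_drop]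
  have hlenA := lengthA seg (gN : Int)
  have hlenB := lengthB seg (gN : Int) hne hpre
  have hlenA' : (segment_to_haplotypes seg (gN : Int)).length = 2 * w := by
    rw [hlenA]; omega
  have hlenB' : (segment_to_haplotypes_alt seg (gN : Int)).length = 2 * w := hlenB
  apply List.ext_getElem
  · rw [hlenA', hlenB']
  intro n hnA hnB
  rw [hlenA'] at hnA
  -- A's n-th element
  have hAside : (segment_to_haplotypes seg (gN : Int))[n]
      = PySem.Str.join "" (seg.filterMap (fun snp =>
          ((PySem.List.slice snp (some (gN : Int)) none).flatMap pvAlleles)[n]?)) := by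
    unfold segment_to_haplotypes
    simp only []
    set hl0 : List (List String) :=
      (PySem.List.pyRange 0 ((((seg.headD []).length : Int) - (gN : Int)) * 2) 1).map
        (fun _ => []) with hhl0
    have hhl0len : hl0.length = 2 * w := by
      rw [hhl0, List.length_map, PySem.List.length_pyRange_one]; omega
    have hbound : ∀ r ∈ seg,
        2 * (PySem.List.slice r (some (gN : Int)) none).length ≤ hl0.length := by
      intro r hr; rw [hhl0len, hpre r hr]
    have hfl : n < (seg.foldl (fun hl snp =>
        (PySem.List.enumerate (PySem.List.slice snp (some (gN : Int)) none) 0).foldl pvAStep hl)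
        hl0).length := by
      rw [length_foldl_rows, hhl0len]; exact hnA
    rw [List.getElem_map]
    have hget : (seg.foldl (fun hl snp =>
        (PySem.List.enumerate (PySem.List.slice snp (some (gN : Int)) none) 0).foldl pvAStep hl)
        hl0)[n]
        = (seg.foldl (fun hl snp =>
        (PySem.List.enumerate (PySem.List.slice snp (some (gN : Int)) none) 0).foldl pvAStep hl)
        hl0).getD n [] := by
      rw [List.getD_eq_getElem?_getD, List.getElem?_eq_getElem hfl]; rfl
    rw [hget, foldl_rows (gN : Int) seg hl0 hbound n (by rw [hhl0len]; exact hnA)]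
    have hinit : hl0.getD n [] = [] := by
      rw [hhl0, List.getD_eq_getElem?_getD, List.getElem?_map]
      cases (PySem.List.pyRange 0 ((((seg.headD []).length : Int) - (gN : Int)) * 2) 1)[n]? <;> simp
    rw [hinit, List.nil_append]
  -- B's n-th element
  have hBside : (segment_to_haplotypes_alt seg (gN : Int))[n]
      = PySem.Str.join "" ((seg.map (fun snp =>
          (PySem.List.slice snp (some (gN : Int)) none).flatMap pvAlleles)).map
            (fun r => r.getD n "")) := by
    unfold segment_to_haplotypes_alt
    simp only []
    rw [List.getElem_map, List.getElem_range]
  rw [hAside, hBside, List.map_map]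
  -- the filterMap never drops: every row has length 2 * w > n
  rw [filterMap_getElem?_eq_map
    (fun snp => (PySem.List.slice snp (some (gN : Int)) none).flatMap pvAlleles) seg n
    (by intro r hr; rw [length_flatMap_pvAlleles, hpre r hr]; exact hnA)]
  rfl

theorem segment_to_haplotypes_changed : Claim_changed_segment_to_haplotypes := by
  unfold Claim_changed_segment_to_haplotypes; decide

theorem segment_to_haplotypes_tight : Claim_exact_segment_to_haplotypes := by
  intro seg gt_start _ hpre hD heq
  unfold Pre_segment_to_haplotypes at hpre
  obtain ⟨hne, hpre⟩ := hpre
  unfold D_segment_to_haplotypes at hD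
  have hlenA := lengthA seg gt_start
  have hlenB := lengthB seg gt_start hne hpre
  have hsl : (PySem.List.slice (seg.headD []) (some gt_start) none).length
      ≤ (seg.headD []).length := by
    rw [PySem.List.slice_some_none, List.length_drop]
    omega
  have : (segment_to_haplotypes seg gt_start).length
      = (segment_to_haplotypes_alt seg gt_start).length := by rw [heq]
  rw [hlenA, hlenB] at this
  omega
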